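-- pv_equiv track=rewrite | github.com/allowedr/codetree-TILs | 241108/2개 이상의 알파벳/more-than-one-alphabet.py | alpha
-- ===== SOURCE A (Python) =====
-- def alpha(A):
--     check = "No"
--     for i in A:
--         for j in A:
--             if i != j:
--                 check = 'Yes'
--                 break
--     return check
-- ===== SOURCE B (Python) =====
-- def alpha(A):
--     first = None
--     for c in A:
--         if first is None:
--             first = c
--         elif c != first:
--             return "Yes"
--     return "No"
-- ===== Notes on version B (the rewrite author's own statement) =====
-- stated objective: faster
-- what changed: Replaces A's all-pairs nested double loop over the string with a single pass that remembers the first character and returns 'Yes' at the first character differing from it.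
import Mathlib
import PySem

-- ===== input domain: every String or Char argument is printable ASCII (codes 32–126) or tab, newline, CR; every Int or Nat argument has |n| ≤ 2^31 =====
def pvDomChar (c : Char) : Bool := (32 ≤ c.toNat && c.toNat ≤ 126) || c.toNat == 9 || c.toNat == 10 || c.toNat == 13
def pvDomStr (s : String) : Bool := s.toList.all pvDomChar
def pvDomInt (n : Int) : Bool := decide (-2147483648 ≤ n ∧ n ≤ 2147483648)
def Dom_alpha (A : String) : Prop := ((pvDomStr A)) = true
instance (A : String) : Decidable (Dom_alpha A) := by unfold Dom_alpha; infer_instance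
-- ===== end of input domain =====

-- B replaces A's quadratic all-pairs scan with one linear pass comparing to the first character (objective: faster).

-- ===== PORT A =====
-- inner 'for j in A: if i != j: check = 'Yes'; break' (break = stop at first differing j)
def alphaInner (i : Char) (js : List Char) (check : String) : String :=
  match js with
  | [] => check
  | j :: rest => if i ≠ j then "Yes" else alphaInner i rest check

def alpha (A : String) : String :=
  A.toList.foldl (fun check i => alphaInner i A.toList check) "No"

-- ===== PORT B =====
-- single pass: remember first char (Option as the None sentinel), return "Yes" at first difference
def altLoop (first : Option Char) (cs : List Char) : String :=
  match cs with
  | [] => "No"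
  | c :: rest =>
    match first with
    | none => altLoop (some c) rest
    | some f => if c ≠ f then "Yes" else altLoop (some f) rest

def alpha_alt (A : String) : String := altLoop none A.toList

-- ===== PRECONDITION & SPEC =====
def Spec_alpha (A : String) (out : String) : Prop := out = alpha_alt A
instance (A : String) (out : String) : Decidable (Spec_alpha A out) := by unfold Spec_alpha; infer_instance

-- ===== CLAIM (what is proved, stated in full; the proofs are below) =====
def Claim_equal_alpha : Prop := ∀ (A : String), Dom_alpha A → Spec_alpha A (alpha A)

-- ===== LEMMAS AND PROOFS =====

theorem alphaInner_eq (i : Char) (js : List Char) (check : String) :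
    alphaInner i js check = if js.all (fun j => j = i) then check else "Yes" := by
  induction js with
  | nil => simp [alphaInner]
  | cons j rest ih =>
    simp only [alphaInner, List.all_cons, ih]
    by_cases h : j = i
    · simp [h]
    · simp [h, Ne.symm h]

theorem foldl_if_yes (p : Char → Bool) (l : List Char) (c : String) :
    l.foldl (fun check i => if p i then check else "Yes") c
      = if l.all p then c else "Yes" := by
  induction l generalizing c with
  | nil => simp
  | cons x rest ih =>
    simp only [List.foldl_cons, List.all_cons, ih]
    by_cases h : p x = true <;> simp [h]

theorem altLoop_some (f : Char) (cs : List Char) :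
    altLoop (some f) cs = if cs.all (fun c => c = f) then "No" else "Yes" := by
  induction cs with
  | nil => simp [altLoop]
  | cons c rest ih =>
    simp only [altLoop, List.all_cons, ih]
    by_cases h : c = f
    · simp [h]
    · simp [h]

theorem alpha_eq_alt (l : List Char) :
    l.foldl (fun check i => alphaInner i l check) "No" = altLoop none l := by
  have hfun : (fun check i => alphaInner i l check)
      = fun check i => if l.all (fun j => j = i) then check else "Yes" := by
    funext check i; exact alphaInner_eq i l check
  rw [hfun, foldl_if_yes]
  cases l with
  | nil => simp [altLoop]
  | cons f rest =>
    have key : ((f :: rest).all fun i => (f :: rest).all fun j => decide (j = i))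
        = (rest.all fun c => decide (c = f)) := by
      rw [Bool.eq_iff_iff]
      simp only [List.all_eq_true, List.mem_cons, decide_eq_true_eq]
      constructor
      · intro h c hc
        exact h f (Or.inl rfl) c (Or.inr hc)
      · intro h i hi j hj
        have hi' : i = f := hi.elim id (h i)
        have hj' : j = f := hj.elim id (h j)
        rw [hi', hj']
    simp only [altLoop, altLoop_some, key]

-- ===== VERDICT (by name: the statement is the Claim_ definition above) =====
theorem alpha_spec : Claim_equal_alpha := by
  intro A _
  unfold Spec_alpha alpha alpha_alt
  exact alpha_eq_alt A.toList
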